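-- pv_equiv track=rewrite | github.com/mateosi98/Time | new_2.py | braid_to_e1
-- ===== SOURCE A (Python) =====
-- def braid_to_e1(braid, number_of_rows):
--   e1 = []
--   for row_number in range(1, number_of_rows+1):
--     row = []
--     for crossing in braid:
--       if abs(crossing) == row_number:
--         if crossing > 0:
--           row.append(1)
--         else:
--           row.append(-1)
--       else:
--         row.append(0)
--     e1.append(row)
--   return e1
-- ===== SOURCE B (Python) =====
-- def braid_to_e1(braid, number_of_rows):
--     e1 = [[0] * len(braid) for _ in range(number_of_rows)]
--     for j, crossing in enumerate(braid):
--         r = abs(crossing)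
--         if 1 <= r <= number_of_rows:
--             e1[r - 1][j] = 1 if crossing > 0 else -1
--     return e1
-- ===== Notes on version B (the rewrite author's own statement) =====
-- stated objective: alternative
-- what changed: Instead of rescanning the whole braid once per row (nested loops), B allocates a zero matrix and makes a single scatter pass over the braid, writing each crossing's sign into its unique (row, column) cell.
import Mathlib
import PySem

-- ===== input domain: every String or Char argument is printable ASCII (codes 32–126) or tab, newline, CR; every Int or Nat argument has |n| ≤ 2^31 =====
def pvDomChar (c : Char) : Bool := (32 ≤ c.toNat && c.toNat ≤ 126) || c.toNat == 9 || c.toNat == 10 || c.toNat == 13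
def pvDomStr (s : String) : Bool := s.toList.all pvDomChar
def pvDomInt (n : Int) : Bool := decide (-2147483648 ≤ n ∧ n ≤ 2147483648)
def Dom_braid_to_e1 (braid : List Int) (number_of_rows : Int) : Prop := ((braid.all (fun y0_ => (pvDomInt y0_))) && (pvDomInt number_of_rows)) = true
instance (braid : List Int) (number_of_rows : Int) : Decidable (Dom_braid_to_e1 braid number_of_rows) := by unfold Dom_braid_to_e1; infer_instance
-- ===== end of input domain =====

-- B builds the matrix in one scatter pass over the braid instead of rescanning the braid per row.

-- ===== PORT A =====
-- A: for row_number in range(1, n+1): for crossing in braid: append ±1/0; append row.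
def braid_to_e1 (braid : List Int) (number_of_rows : Int) : List (List Int) :=
  (PySem.List.pyRange 1 (number_of_rows + 1) 1).foldl
    (fun e1 row_number =>
      e1 ++ [braid.foldl
        (fun row crossing =>
          if |crossing| = row_number then
            (if crossing > 0 then row ++ [(1 : Int)] else row ++ [(-1 : Int)])
          else row ++ [(0 : Int)]) []])
    []

-- ===== PORT B =====
-- B: zero matrix, then one pass over enumerate(braid) scattering each crossing's sign.
def braid_to_e1_alt (braid : List Int) (number_of_rows : Int) : List (List Int) :=
  let init := (List.range number_of_rows.toNat).map (fun _ => List.replicate braid.length (0 : Int))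
  (PySem.List.enumerate braid 0).foldl
    (fun e1 jc =>
      let r := |jc.2|
      if 1 ≤ r ∧ r ≤ number_of_rows then
        e1.modify (r - 1).toNat (fun row => row.set jc.1.toNat (if jc.2 > 0 then (1 : Int) else -1))
      else e1)
    init

-- ===== PRECONDITION & SPEC =====
def Spec_braid_to_e1 (braid : List Int) (number_of_rows : Int) (out : List (List Int)) : Prop := out = braid_to_e1_alt braid number_of_rows
instance (braid : List Int) (number_of_rows : Int) (out : List (List Int)) : Decidable (Spec_braid_to_e1 braid number_of_rows out) := by unfold Spec_braid_to_e1; infer_instance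

-- ===== CLAIM (what is proved, stated in full; the proofs are below) =====
def Claim_equal_braid_to_e1 : Prop := ∀ (braid : List Int) (number_of_rows : Int), Dom_braid_to_e1 braid number_of_rows → Spec_braid_to_e1 braid number_of_rows (braid_to_e1 braid number_of_rows)

-- ===== LEMMAS AND PROOFS =====

-- the common closed form: row i (0-based) has entry sign(c) where |c| = i+1
def pvRowEntry (i : Nat) (c : Int) : Int :=
  if c.natAbs = i + 1 then (if 0 < c then 1 else -1) else 0

def pvSpecMat (braid : List Int) (n : Int) : List (List Int) :=
  (List.range n.toNat).map (fun i => braid.map (pvRowEntry i))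

-- ---- A side ----
theorem braid_to_e1_eq_spec (braid : List Int) (n : Int) :
    braid_to_e1 braid n = pvSpecMat braid n := by
  unfold braid_to_e1 pvSpecMat
  have hinner : ∀ r : Int,
      braid.foldl
        (fun row crossing =>
          if |crossing| = r then
            (if crossing > 0 then row ++ [(1 : Int)] else row ++ [(-1 : Int)])
          else row ++ [(0 : Int)]) []
      = braid.map (fun c => if |c| = r then (if 0 < c then (1 : Int) else -1) else 0) := by
    intro r
    have hfun : (fun (row : List Int) (crossing : Int) =>
        if |crossing| = r then
          (if crossing > 0 then row ++ [(1 : Int)] else row ++ [(-1 : Int)])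
        else row ++ [(0 : Int)])
        = fun (row : List Int) (c : Int) =>
          row ++ [if |c| = r then (if 0 < c then (1 : Int) else -1) else 0] := by
      funext row c
      by_cases h1 : |c| = r <;> by_cases h2 : 0 < c <;> simp [h1, h2]
    rw [hfun, PySem.List.foldl_append_singleton_eq_map]
    simp
  have houter := PySem.List.foldl_append_singleton_eq_map
    (l := PySem.List.pyRange 1 (n + 1) 1)
    (f := fun r => braid.map (fun c => if |c| = r then (if 0 < c then (1 : Int) else -1) else 0))
    (acc := ([] : List (List Int)))
  simp only [hinner]
  rw [houter, PySem.List.pyRange_one]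
  have : (n + 1 - 1 : Int) = n := by ring
  rw [this, List.map_map]
  apply List.map_congr_left
  intro i hi
  apply List.map_congr_left
  intro c _
  unfold pvRowEntry
  have habs : |c| = (c.natAbs : Int) := Int.abs_eq_natAbs c
  by_cases h : c.natAbs = i + 1
  · simp [habs, h]
    omega
  · have : ¬ (|c| = (1 : Int) + i) := by omega
    simp [h, this]

-- ---- B side ----
-- pushing the matrix fold down to each row via getElem?
theorem bfold_getElem? (n : Int) (l : List (Int × Int)) (mat : List (List Int)) (i : Nat) :
    (l.foldl
      (fun e1 jc =>
        if 1 ≤ |jc.2| ∧ |jc.2| ≤ n then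
          e1.modify (|jc.2| - 1).toNat (fun row => row.set jc.1.toNat (if jc.2 > 0 then (1 : Int) else -1))
        else e1)
      mat)[i]? =
    (mat[i]?).map (fun row0 =>
      l.foldl
        (fun row jc =>
          if (1 ≤ |jc.2| ∧ |jc.2| ≤ n) ∧ (|jc.2| - 1).toNat = i then
            row.set jc.1.toNat (if jc.2 > 0 then (1 : Int) else -1)
          else row)
        row0) := by
  induction l generalizing mat with
  | nil => simp
  | cons jc rest ih =>
    simp only [List.foldl_cons]
    rw [ih]
    by_cases hc : 1 ≤ |jc.2| ∧ |jc.2| ≤ n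
    · rw [if_pos hc, List.getElem?_modify]
      by_cases hi : (|jc.2| - 1).toNat = i
      · cases h : mat[i]? <;> simp [hc]
      · cases h : mat[i]? <;> simp [hc]
    · rw [if_neg hc]
      cases h : mat[i]? <;> simp [hc]

-- a positional set into pre ++ x :: t at index pre.length
theorem set_append_len {α : Type} (pre : List α) (x y : α) (t : List α) :
    (pre ++ x :: t).set pre.length y = pre ++ y :: t := by
  induction pre with
  | nil => simp
  | cons a pre ih => simp [ih]

-- the per-row scatter fold fills the zero row with the mapped entries
theorem rowfold_eq (i : Nat) (rest : List Int) :
    ∀ (k : Nat) (pre : List Int), pre.length = k →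
    (PySem.List.enumerate rest (k : Int)).foldl
      (fun row jc =>
        if jc.2.natAbs = i + 1 then
          row.set jc.1.toNat (if jc.2 > 0 then (1 : Int) else -1)
        else row)
      (pre ++ List.replicate rest.length 0)
    = pre ++ rest.map (pvRowEntry i) := by
  induction rest with
  | nil => intro k pre _; simp [PySem.List.enumerate_nil]
  | cons c rest ih =>
    intro k pre hk
    rw [PySem.List.enumerate_cons]
    simp only [List.foldl_cons, List.length_cons, List.replicate_succ]
    by_cases h : c.natAbs = i + 1
    · have hset : ((pre ++ (0 : Int) :: List.replicate rest.length 0).set (k : Int).toNat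
          (if c > 0 then (1 : Int) else -1))
          = (pre ++ [if c > 0 then (1 : Int) else -1]) ++ List.replicate rest.length 0 := by
        have : (k : Int).toNat = pre.length := by omega
        rw [this, set_append_len]
        simp
      have hk1 : ((k : Int) + 1) = ((k + 1 : Nat) : Int) := by push_cast; ring
      rw [if_pos h, hset, hk1, ih (k + 1) (pre ++ [if c > 0 then (1 : Int) else -1]) (by simp; omega)]
      simp [pvRowEntry, h]
    · have happ : pre ++ (0 : Int) :: List.replicate rest.length 0
          = (pre ++ [(0 : Int)]) ++ List.replicate rest.length 0 := by simp
      have hk1 : ((k : Int) + 1) = ((k + 1 : Nat) : Int) := by push_cast; ring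
      rw [if_neg h, happ, hk1, ih (k + 1) (pre ++ [(0 : Int)]) (by simp; omega)]
      simp [pvRowEntry, h]

theorem braid_to_e1_alt_eq_spec (braid : List Int) (n : Int) :
    braid_to_e1_alt braid n = pvSpecMat braid n := by
  unfold braid_to_e1_alt pvSpecMat
  apply List.ext_getElem?
  intro i
  rw [bfold_getElem?]
  by_cases hi : i < n.toNat
  · simp only [List.getElem?_map, List.getElem?_range hi, Option.map_some]
    congr 1
    have hcond : (fun (row : List Int) (jc : Int × Int) =>
        if (1 ≤ |jc.2| ∧ |jc.2| ≤ n) ∧ (|jc.2| - 1).toNat = i then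
          row.set jc.1.toNat (if jc.2 > 0 then (1 : Int) else -1)
        else row)
        = fun (row : List Int) (jc : Int × Int) =>
          if jc.2.natAbs = i + 1 then
            row.set jc.1.toNat (if jc.2 > 0 then (1 : Int) else -1)
          else row := by
      funext row jc
      have habs : |jc.2| = (jc.2.natAbs : Int) := Int.abs_eq_natAbs jc.2
      by_cases h : jc.2.natAbs = i + 1
      · have : (1 ≤ |jc.2| ∧ |jc.2| ≤ n) ∧ (|jc.2| - 1).toNat = i := by
          constructor
          · constructor <;> omega
          · omega
        simp [h, this]
      · have : ¬ ((1 ≤ |jc.2| ∧ |jc.2| ≤ n) ∧ (|jc.2| - 1).toNat = i) := by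
          intro hcc
          apply h
          omega
        rw [if_neg this, if_neg h]
    rw [hcond]
    exact rowfold_eq i braid 0 [] rfl
  · have h1 : ((List.range n.toNat).map (fun _ => List.replicate braid.length (0 : Int)))[i]? = none :=
      List.getElem?_eq_none (by simp; omega)
    have h2 : ((List.range n.toNat).map (fun i => braid.map (pvRowEntry i)))[i]? = none :=
      List.getElem?_eq_none (by simp; omega)
    rw [h1, h2]
    simp

-- ===== VERDICT (by name: the statement is the Claim_ definition above) =====
theorem braid_to_e1_spec : Claim_equal_braid_to_e1 := by
  intro braid n _
  unfold Spec_braid_to_e1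
  rw [braid_to_e1_eq_spec, braid_to_e1_alt_eq_spec]
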